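-- pv_equiv track=rewrite | github.com/keep-starknet-strange/garaga | hydra/garaga/definitions.py | replace_consecutive_zeros
-- ===== SOURCE A (Python) =====
-- def replace_consecutive_zeros(lst):
--     result = []
--     i = 0
--     while i < len(lst):
--         if i < len(lst) - 1 and lst[i] == 0 and lst[i + 1] == 0:
--             result.append(3)  # Replace consecutive zeros with 3
--             i += 2
--         elif lst[i] == -1:
--             result.append(2)  # Replace -1 with 2
--             i += 1
--         else:
--             result.append(lst[i])
--             i += 1
--     return result
-- ===== SOURCE B (Python) =====
-- def replace_consecutive_zeros(lst):
--     # Run-length single pass: count a run of zeros, then flush it as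
--     # (run // 2) threes plus the run's last zero if the run length is odd.
--     result = []
--     run = 0
--     last_zero = 0
--     for x in lst:
--         if x == 0:
--             run += 1
--             last_zero = x
--         else:
--             result.extend([3] * (run // 2))
--             if run % 2:
--                 result.append(last_zero)
--             run = 0
--             result.append(2 if x == -1 else x)
--     result.extend([3] * (run // 2))
--     if run % 2:
--         result.append(last_zero)
--     return result
-- ===== Notes on version B (the rewrite author's own statement) =====
-- stated objective: alternative
-- what changed: B replaces A's index-based while loop with one-element lookahead by a single for-loop fold that run-length-counts maximal zero runs and flushes each run as run//2 threes plus the run's last zero when odd.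
import Mathlib
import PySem

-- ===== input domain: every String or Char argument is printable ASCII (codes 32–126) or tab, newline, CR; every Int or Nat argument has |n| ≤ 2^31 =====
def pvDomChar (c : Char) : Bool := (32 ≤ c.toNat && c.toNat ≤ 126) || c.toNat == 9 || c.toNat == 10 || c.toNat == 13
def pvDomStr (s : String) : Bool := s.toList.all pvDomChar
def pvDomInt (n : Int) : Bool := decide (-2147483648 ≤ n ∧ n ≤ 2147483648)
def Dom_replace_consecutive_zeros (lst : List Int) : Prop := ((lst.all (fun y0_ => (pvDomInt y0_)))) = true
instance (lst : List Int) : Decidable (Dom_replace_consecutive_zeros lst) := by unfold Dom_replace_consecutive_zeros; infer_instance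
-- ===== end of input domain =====

-- B differs from A only in structure (run-length counting fold vs index while loop); values agree everywhere.

-- ===== PORT A =====
-- A's while loop over index i, decreasing measure lst.length - i.
def replace_consecutive_zeros.go (lst : List Int) (i : Nat) : List Int :=
  if _h : i < lst.length then
    if i < lst.length - 1 ∧ lst.getD i 0 = 0 ∧ lst.getD (i + 1) 0 = 0 then
      3 :: replace_consecutive_zeros.go lst (i + 2)
    else if lst.getD i 0 = -1 then
      2 :: replace_consecutive_zeros.go lst (i + 1)
    else
      lst.getD i 0 :: replace_consecutive_zeros.go lst (i + 1)
  else
    []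
termination_by lst.length - i

def replace_consecutive_zeros (lst : List Int) : List Int :=
  replace_consecutive_zeros.go lst 0

-- ===== PORT B =====
-- flush of a pending zero run: run/2 threes, plus the run's last zero if odd.
def rczFlush (run : Nat) (lastZero : Int) : List Int :=
  List.replicate (run / 2) 3 ++ (if run % 2 = 1 then [lastZero] else [])

def replace_consecutive_zeros_alt (lst : List Int) : List Int :=
  let s := lst.foldl
    (fun (st : List Int × Nat × Int) x =>
      if x = 0 then (st.1, st.2.1 + 1, x)
      else (st.1 ++ rczFlush st.2.1 st.2.2 ++ [if x = -1 then 2 else x], 0, st.2.2))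
    ([], 0, 0)
  s.1 ++ rczFlush s.2.1 s.2.2

-- ===== PRECONDITION & SPEC =====
def Spec_replace_consecutive_zeros (lst : List Int) (out : List Int) : Prop := out = replace_consecutive_zeros_alt lst
instance (lst : List Int) (out : List Int) : Decidable (Spec_replace_consecutive_zeros lst out) := by unfold Spec_replace_consecutive_zeros; infer_instance

-- ===== CLAIM (what is proved, stated in full; the proofs are below) =====
def Claim_equal_replace_consecutive_zeros : Prop := ∀ (lst : List Int), Dom_replace_consecutive_zeros lst → Spec_replace_consecutive_zeros lst (replace_consecutive_zeros lst)

-- ===== LEMMAS AND PROOFS =====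

-- structural restatement of A's loop over the remaining suffix
def rczA : List Int → List Int
  | x :: y :: rest =>
    if x = 0 ∧ y = 0 then 3 :: rczA rest
    else if x = -1 then 2 :: rczA (y :: rest)
    else x :: rczA (y :: rest)
  | [x] => if x = -1 then [2] else [x]
  | [] => []

-- structural restatement of B's fold over the remaining suffix, carrying the pending run
def rczB (run : Nat) (lastZero : Int) : List Int → List Int
  | [] => rczFlush run lastZero
  | x :: rest =>
    if x = 0 then rczB (run + 1) x rest
    else rczFlush run lastZero ++ (if x = -1 then 2 else x) :: rczB 0 lastZero rest

theorem rczA_cons_ne {x : Int} (hx : x ≠ 0) (rest : List Int) :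
    rczA (x :: rest) = (if x = -1 then 2 else x) :: rczA rest := by
  cases rest with
  | nil => simp only [rczA]; split <;> rfl
  | cons y r => simp only [rczA, hx, false_and, if_false]; split <;> rfl

theorem rczA_zero_cons_ne {x : Int} (hx : x ≠ 0) (rest : List Int) :
    rczA (0 :: x :: rest) = 0 :: rczA (x :: rest) := by
  simp [rczA, hx]

theorem rczA_go_eq_drop (lst : List Int) (i : Nat) :
    replace_consecutive_zeros.go lst i = rczA (lst.drop i) := by
  fun_induction replace_consecutive_zeros.go lst i with
  | case1 i h hc ih =>
    obtain ⟨h1, hz0, hz1⟩ := hc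
    have h1' : i + 1 < lst.length := by omega
    rw [List.drop_eq_getElem_cons h, List.drop_eq_getElem_cons h1']
    rw [List.getD_eq_getElem lst 0 h] at hz0
    rw [List.getD_eq_getElem lst 0 h1'] at hz1
    simp [rczA, hz0, hz1, ih]
  | case2 i h hc hm ih =>
    rw [List.getD_eq_getElem lst 0 h] at hm
    rw [List.drop_eq_getElem_cons h]
    have hx : lst[i] ≠ 0 := by rw [hm]; decide
    rw [rczA_cons_ne hx, if_pos hm, ih]
  | case3 i h hc hm ih =>
    rw [List.getD_eq_getElem lst 0 h] at hm ⊢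
    rw [List.drop_eq_getElem_cons h]
    by_cases hx : lst[i] = 0
    · -- lst[i] = 0 but the pair condition failed: the successor is absent or nonzero
      cases hrest : lst.drop (i + 1) with
      | nil => simp [rczA, ih, hrest, hx]
      | cons y r =>
        have h1' : i + 1 < lst.length := by
          by_contra hcon
          rw [List.drop_eq_nil_iff.mpr (by omega)] at hrest
          exact absurd hrest (by simp)
        have hy : y = lst[i + 1] := by
          have := List.drop_eq_getElem_cons h1' (l := lst)
          rw [hrest] at this
          exact (List.cons.injEq .. ▸ this).1
        have hy0 : y ≠ 0 := by
          intro h0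
          exact hc ⟨by omega, by rw [List.getD_eq_getElem lst 0 h]; exact hx,
            by rw [List.getD_eq_getElem lst 0 h1', ← hy]; exact h0⟩
        rw [hx, rczA_zero_cons_ne hy0, ih, hrest]
    · rw [rczA_cons_ne hx, if_neg hm, ih]
  | case4 i h =>
    rw [List.drop_eq_nil_iff.mpr (by omega)]
    rfl

theorem foldl_eq_rczB (l : List Int) (res : List Int) (run : Nat) (lz : Int) :
    (let s := l.foldl
      (fun (st : List Int × Nat × Int) x =>
        if x = 0 then (st.1, st.2.1 + 1, x)
        else (st.1 ++ rczFlush st.2.1 st.2.2 ++ [if x = -1 then 2 else x], 0, st.2.2))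
      (res, run, lz)
     s.1 ++ rczFlush s.2.1 s.2.2) = res ++ rczB run lz l := by
  induction l generalizing res run lz with
  | nil => simp [rczB]
  | cons x rest ih =>
    simp only [List.foldl_cons]
    by_cases hx : x = 0
    · subst hx
      rw [if_pos rfl, ih]
      simp [rczB]
    · rw [if_neg hx, ih]
      simp [rczB, hx, List.append_assoc]

theorem rczA_pairs (run : Nat) (l : List Int) :
    rczA (List.replicate run 0 ++ l) =
      List.replicate (run / 2) 3 ++ rczA (List.replicate (run % 2) 0 ++ l) := by
  induction run using Nat.strong_induction_on with
  | _ run ih =>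
    match run with
    | 0 => simp
    | 1 => simp
    | n + 2 =>
      have h2 : List.replicate (n + 2) (0 : Int) ++ l = 0 :: 0 :: (List.replicate n 0 ++ l) := by
        simp [List.replicate_succ]
      have hd : (n + 2) / 2 = n / 2 + 1 := by omega
      have hm : (n + 2) % 2 = n % 2 := by omega
      rw [h2]
      show rczA _ = _
      rw [show rczA (0 :: 0 :: (List.replicate n 0 ++ l)) = 3 :: rczA (List.replicate n 0 ++ l) from by
        simp [rczA]]
      rw [ih n (by omega), hd, hm, List.replicate_succ]
      simp

theorem rczB_eq_rczA (l : List Int) (run : Nat) (lz : Int) (h : lz = 0) :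
    rczB run lz l = rczA (List.replicate run 0 ++ l) := by
  subst h
  induction l generalizing run with
  | nil =>
    rw [rczA_pairs]
    rcases Nat.mod_two_eq_zero_or_one run with hm | hm <;>
      simp [rczB, rczFlush, rczA, hm]
  | cons x rest ih =>
    by_cases hx : x = 0
    · subst hx
      show (if (0:Int) = 0 then rczB (run + 1) 0 rest else _) = _
      rw [if_pos rfl, ih]
      rw [show List.replicate (run + 1) (0:Int) ++ rest = List.replicate run 0 ++ 0 :: rest from by
        simp [List.replicate_succ']]
    · show (if x = 0 then _ else rczFlush run 0 ++ (if x = -1 then 2 else x) :: rczB 0 0 rest) = _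
      rw [if_neg hx, rczA_pairs]
      have h0 := ih 0
      simp only [List.replicate, List.nil_append] at h0
      rw [h0]
      rcases Nat.mod_two_eq_zero_or_one run with hm | hm
      · simp [rczFlush, hm, rczA_cons_ne hx]
      · simp [rczFlush, hm, rczA_zero_cons_ne hx, rczA_cons_ne hx]

-- ===== VERDICT (by name: the statement is the Claim_ definition above) =====
theorem replace_consecutive_zeros_spec : Claim_equal_replace_consecutive_zeros := by
  intro lst _
  unfold Spec_replace_consecutive_zeros replace_consecutive_zeros replace_consecutive_zeros_alt
  rw [rczA_go_eq_drop, List.drop_zero, foldl_eq_rczB, rczB_eq_rczA _ _ _ rfl]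
  simp
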